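-- pv_equiv track=rewrite | github.com/Proyecto-Futuros-Andy-A-Porras-R/MiniWaze | proyecto_02.py | validarHora
-- ===== SOURCE A (Python) =====
-- def validarHora(hora):
--     # validar que la hora sea en formato hh:mm
--     if contarCaracteres(hora) == 5:
--         for i in range(5):
--             if i == 2:
--                 if hora[i] != ":":
--                     return False
--             else:
--                 for j in range(10):
--                     if hora[i] == str(j):
--                         break
--                     elif j > 2 and i == 0:
--                         return False
--                     elif j > 5 and i == 3:
--                         return False
--     else:
--         return False
--     return True
--
-- def contarCaracteres(string):
--     contador = 0
--     for caracter in string: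
--         contador += 1
--     return contador
-- ===== SOURCE B (Python) =====
-- def validarHora(hora):
--     # Straight-line guards: length, colon, and the only two positions A constrains
--     # (A accepts 0-3 at position 0, 0-6 at position 3, anything at positions 1 and 4).
--     if len(hora) != 5:
--         return False
--     if hora[2] != ":":
--         return False
--     if hora[0] not in ('0', '1', '2', '3'):
--         return False
--     if hora[3] not in ('0', '1', '2', '3', '4', '5', '6'):
--         return False
--     return True
-- ===== Notes on version B (the rewrite author's own statement) =====
-- stated objective: simpler
-- what changed: Replaced A's nested for-loops (a hand-rolled character count plus a 10-iteration digit scan per position) with four direct guards on length, the colon, and the two positions A actually constrains, reproducing A's exact accepted set (0-3 at position 0, 0-6 at position 3, positions 1 and 4 unchecked).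
import Mathlib
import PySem

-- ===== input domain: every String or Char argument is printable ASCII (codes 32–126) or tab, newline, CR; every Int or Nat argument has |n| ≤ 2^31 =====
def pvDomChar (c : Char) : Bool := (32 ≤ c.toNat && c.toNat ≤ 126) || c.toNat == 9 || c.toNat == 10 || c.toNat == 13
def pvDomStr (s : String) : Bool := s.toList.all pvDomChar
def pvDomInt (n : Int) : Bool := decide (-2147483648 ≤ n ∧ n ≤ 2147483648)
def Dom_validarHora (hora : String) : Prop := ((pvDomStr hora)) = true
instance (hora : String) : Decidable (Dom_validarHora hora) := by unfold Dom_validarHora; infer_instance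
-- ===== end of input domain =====

-- B replaces A's nested scanning loops with four straight-line guards; objective: simpler.

-- ===== PORT A =====
def contarCaracteres (s : String) : Int :=
  s.toList.foldl (fun contador _ => contador + 1) 0

-- inner 'for j in range(10)' loop: none = fell through / break, some b = 'return b'
def pvLoopJ (c : Char) (i : Int) : List Int → Option Bool
  | [] => none
  | j :: rest =>
    if String.ofList [c] == PySem.Int.toStr j then none               -- break
    else if j > 2 && i == 0 then some false
    else if j > 5 && i == 3 then some false
    else pvLoopJ c i rest

-- outer 'for i in range(5)' loop (the length-5 guard makes every index in range;
-- the 'none' index branch is unreachable under that guard)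
def pvLoopI (hora : String) : List Int → Option Bool
  | [] => none
  | i :: rest =>
    match PySem.Str.pyGet? hora i with
    | none => some false
    | some c =>
      if i == 2 then
        if c ≠ ':' then some false else pvLoopI hora rest
      else
        match pvLoopJ c i (PySem.List.pyRange 0 10 1) with
        | some b => some b
        | none => pvLoopI hora rest

def validarHora (hora : String) : Bool :=
  if contarCaracteres hora == 5 then
    match pvLoopI hora (PySem.List.pyRange 0 5 1) with
    | some b => b
    | none => true
  else false

-- ===== PORT B =====
def validarHora_alt (hora : String) : Bool :=
  let cs := hora.toList
  if cs.length ≠ 5 then false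
  else if PySem.List.pyGet? cs 2 ≠ some ':' then false
  else if ¬ (PySem.List.pyGet? cs 0).elim false (fun c => c ∈ ['0','1','2','3']) then false
  else if ¬ (PySem.List.pyGet? cs 3).elim false (fun c => c ∈ ['0','1','2','3','4','5','6']) then false
  else true

-- ===== PRECONDITION & SPEC =====
def Spec_validarHora (hora : String) (out : Bool) : Prop := out = validarHora_alt hora
instance (hora : String) (out : Bool) : Decidable (Spec_validarHora hora out) := by unfold Spec_validarHora; infer_instance

-- ===== CLAIM (what is proved, stated in full; the proofs are below) =====
def Claim_equal_validarHora : Prop := ∀ (hora : String), Dom_validarHora hora → Spec_validarHora hora (validarHora hora)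

-- ===== LEMMAS AND PROOFS =====
theorem foldl_count (xs : List Char) : ∀ a : Int, xs.foldl (fun c _ => c + 1) a = a + xs.length := by
  induction xs with
  | nil => simp
  | cons x t ih => intro a; simp [ih]; omega

theorem contar_eq_length (s : String) : contarCaracteres s = (s.toList.length : Int) := by
  unfold contarCaracteres
  simpa using foldl_count s.toList 0

theorem strEq (c d : Char) : (String.ofList [c] == String.ofList [d]) = (c == d) := by
  simp [String.ext_iff, String.toList_ofList]

theorem loopJ_pos0 (c : Char) :
    pvLoopJ c 0 (PySem.List.pyRange 0 10 1) =
      if c = '0' ∨ c = '1' ∨ c = '2' ∨ c = '3' then none else some false := by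
  have hr : PySem.List.pyRange 0 10 1 = [0,1,2,3,4,5,6,7,8,9] := by decide
  have h0 : PySem.Int.toStr 0 = String.ofList ['0'] := by decide
  have h1 : PySem.Int.toStr 1 = String.ofList ['1'] := by decide
  have h2 : PySem.Int.toStr 2 = String.ofList ['2'] := by decide
  have h3 : PySem.Int.toStr 3 = String.ofList ['3'] := by decide
  simp only [hr, pvLoopJ, h0, h1, h2, h3, strEq]
  by_cases e0 : c = '0' <;> by_cases e1 : c = '1' <;> by_cases e2 : c = '2' <;>
    by_cases e3 : c = '3' <;> simp_all

theorem loopJ_pos3 (c : Char) :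
    pvLoopJ c 3 (PySem.List.pyRange 0 10 1) =
      if c = '0' ∨ c = '1' ∨ c = '2' ∨ c = '3' ∨ c = '4' ∨ c = '5' ∨ c = '6' then none else some false := by
  have hr : PySem.List.pyRange 0 10 1 = [0,1,2,3,4,5,6,7,8,9] := by decide
  have h0 : PySem.Int.toStr 0 = String.ofList ['0'] := by decide
  have h1 : PySem.Int.toStr 1 = String.ofList ['1'] := by decide
  have h2 : PySem.Int.toStr 2 = String.ofList ['2'] := by decide
  have h3 : PySem.Int.toStr 3 = String.ofList ['3'] := by decide
  have h4 : PySem.Int.toStr 4 = String.ofList ['4'] := by decide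
  have h5 : PySem.Int.toStr 5 = String.ofList ['5'] := by decide
  have h6 : PySem.Int.toStr 6 = String.ofList ['6'] := by decide
  simp only [hr, pvLoopJ, h0, h1, h2, h3, h4, h5, h6, strEq]
  by_cases e0 : c = '0' <;> by_cases e1 : c = '1' <;> by_cases e2 : c = '2' <;>
    by_cases e3 : c = '3' <;> by_cases e4 : c = '4' <;> by_cases e5 : c = '5' <;>
    by_cases e6 : c = '6' <;> simp_all

theorem loopJ_free (c : Char) (i : Int) (h0 : i ≠ 0) (h3 : i ≠ 3) (js : List Int) :
    pvLoopJ c i js = none := by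
  induction js with
  | nil => rfl
  | cons j rest ih => simp [pvLoopJ, h0, h3, ih]

-- ===== VERDICT (by name: the statement is the Claim_ definition above) =====
theorem validarHora_spec : Claim_equal_validarHora := by
  intro hora _
  unfold Spec_validarHora validarHora validarHora_alt
  rw [contar_eq_length]
  by_cases hL : hora.toList.length = 5
  · rcases h : hora.toList with _ | ⟨a, _ | ⟨b, _ | ⟨c, _ | ⟨d, _ | ⟨e, _ | ⟨f, t⟩⟩⟩⟩⟩⟩ <;>
      rw [h] at hL <;> simp at hL
    have hg0 : PySem.Str.pyGet? hora 0 = some a := by simp [h]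
    have hg1 : PySem.Str.pyGet? hora 1 = some b := by simp [h]
    have hg2 : PySem.Str.pyGet? hora 2 = some c := by simp [h]
    have hg3 : PySem.Str.pyGet? hora 3 = some d := by simp [h]
    have hg4 : PySem.Str.pyGet? hora 4 = some e := by simp [h]
    have hr5 : PySem.List.pyRange 0 5 1 = [0,1,2,3,4] := by decide
    have hj1 : pvLoopJ b 1 (PySem.List.pyRange 0 10 1) = none :=
      loopJ_free b 1 (by decide) (by decide) _
    have hj4 : pvLoopJ e 4 (PySem.List.pyRange 0 10 1) = none :=
      loopJ_free e 4 (by decide) (by decide) _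
    rw [hr5]
    simp only [pvLoopI, hg0, hg1, hg2, hg3, hg4, hj1, hj4, loopJ_pos0, loopJ_pos3]
    norm_num [PySem.List.pyGet?, PySem.List.pyIdx?]
    by_cases hc : c = ':' <;>
      by_cases ha : a = '0' ∨ a = '1' ∨ a = '2' ∨ a = '3' <;>
      by_cases hd : d = '0' ∨ d = '1' ∨ d = '2' ∨ d = '3' ∨ d = '4' ∨ d = '5' ∨ d = '6' <;>
      simp_all
  · have hL2 : ¬ (hora.length = 5) := by simpa using hL
    have h12 : ¬ ((hora.length : Int) = 5) := by omega
    simp [hL2, h12]
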